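-- pv_equiv track=rewrite | github.com/togethercomputer/Decentralized_Training | scheduler.py | all_candidate_partitions
-- ===== SOURCE A (Python) =====
-- import itertools
--
-- def all_candidate_partitions(nodes=None, partition_size=None):
--     candidate_partitions = []
--     if len(nodes) == partition_size:
--         candidate_partitions.append([tuple(nodes)])
--     else:
--         for cur_partition in itertools.combinations(nodes, partition_size):
--             rest_nodes = nodes.copy()
--             for node in cur_partition:
--                 rest_nodes.remove(node)
--
--             rest_partitions = all_candidate_partitions(
--                 rest_nodes, partition_size)
--             for rest_partition in rest_partitions:
--                 candidate_partitions.append([cur_partition])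
--                 candidate_partitions[-1].extend(rest_partition)
--     return candidate_partitions
-- ===== SOURCE B (Python) =====
-- import itertools
--
-- def all_candidate_partitions(nodes=None, partition_size=None):
--     results = []
--     stack = [(list(nodes), [])]
--     while stack:
--         remaining, prefix = stack.pop()
--         if len(remaining) == partition_size:
--             results.append(prefix + [tuple(remaining)])
--             continue
--         children = []
--         for combo in itertools.combinations(remaining, partition_size):
--             rest = remaining.copy()
--             for node in combo:
--                 rest.remove(node)
--             children.append((rest, prefix + [combo]))
--         stack.extend(reversed(children))
--     return results
-- ===== Notes on version B (the rewrite author's own statement) =====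
-- stated objective: alternative
-- what changed: Replaces A's recursion with an iterative worklist: a stack of (remaining_nodes, prefix_groups) states, children pushed in reverse so complete partitions are emitted in A's DFS left-to-right order.
import Mathlib
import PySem

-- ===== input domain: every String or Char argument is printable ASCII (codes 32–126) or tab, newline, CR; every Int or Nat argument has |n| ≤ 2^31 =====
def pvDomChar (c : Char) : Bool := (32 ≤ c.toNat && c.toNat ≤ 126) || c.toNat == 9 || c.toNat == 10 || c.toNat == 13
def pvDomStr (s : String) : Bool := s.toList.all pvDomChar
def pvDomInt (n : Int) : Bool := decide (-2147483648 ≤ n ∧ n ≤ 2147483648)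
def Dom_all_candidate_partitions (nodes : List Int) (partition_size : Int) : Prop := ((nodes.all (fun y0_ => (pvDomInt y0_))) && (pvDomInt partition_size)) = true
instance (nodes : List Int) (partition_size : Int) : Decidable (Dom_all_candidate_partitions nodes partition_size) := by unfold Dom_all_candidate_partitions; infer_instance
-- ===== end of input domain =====

-- B replaces A's recursion by an explicit worklist (stack of (remaining, prefix) states,
-- children pushed in reverse) that emits complete partitions in A's DFS order: a different
-- decomposition of the same enumeration (objective: alternative; same asymptotic cost).

-- ===== PORT A =====
-- itertools.combinations(xs, r) with a Python int r: negative r raises ValueError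
-- (excluded by Pre_); otherwise PySem.List.combinations on r.toNat is exact.
def pyCombosInt (xs : List Int) (r : Int) : List (List Int) :=
  if r < 0 then [] else PySem.List.combinations xs r.toNat

-- 'rest = nodes.copy(); for node in cur: rest.remove(node)' — remove never raises here
-- because cur is a combination (sublist) of nodes, so each value is present; the .getD
-- branch is unreachable on such inputs.
def removeAll (xs : List Int) (cur : List Int) : List Int :=
  cur.foldl (fun r v => (PySem.List.remove? r v).getD r) xs

-- fuel = nodes.length + 1 only makes the recursion structurally total; inside Pre_ each
-- recursive call strictly shrinks the node list, so the fuel is never exhausted.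
def acpFuel : Nat → List Int → Int → List (List (List Int))
  | 0, _, _ => []
  | fuel + 1, nodes, ps =>
    if (nodes.length : Int) = ps then [[nodes]]
    else
      (pyCombosInt nodes ps).foldl (fun acc cur =>
        let rest := removeAll nodes cur
        let restPartitions := acpFuel fuel rest ps
        restPartitions.foldl (fun a rp => a ++ [cur :: rp]) acc) []

def all_candidate_partitions (nodes : List Int) (partition_size : Int) : List (List (List Int)) :=
  acpFuel (nodes.length + 1) nodes partition_size

-- ===== PORT B =====
-- One worklist iteration: pop a state, emit or push its children (in order: Python pushes
-- reversed(children) onto an end-popped stack, i.e. prepends them in order here).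
-- The fuel only bounds the number of loop iterations (the Python 'while stack'); inside
-- Pre_ the bound bFuel below is proved sufficient.
def bLoop : Nat → Int → List (List Int × List (List Int)) → List (List (List Int)) → List (List (List Int))
  | 0, _, _, res => res
  | _ + 1, _, [], res => res
  | fuel + 1, ps, (remaining, pref) :: stack, res =>
    if (remaining.length : Int) = ps then
      bLoop fuel ps stack (res ++ [pref ++ [remaining]])
    else
      let children := (pyCombosInt remaining ps).map
        (fun c => (removeAll remaining c, pref ++ [c]))
      bLoop fuel ps (children ++ stack) res

def bFuel (m : Nat) : Nat := 2 ^ ((m + 1) * (m + 1))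

def all_candidate_partitions_alt (nodes : List Int) (partition_size : Int) : List (List (List Int)) :=
  bLoop (bFuel nodes.length) partition_size [(nodes, [])] []

-- ===== PRECONDITION & SPEC =====
-- Pre_ excludes exactly the inputs where A raises: partition_size < 0 (ValueError from
-- itertools.combinations) and partition_size = 0 with nonempty nodes (infinite recursion,
-- RecursionError). On every excluded input A raises; it returns on all admitted ones.
def Pre_all_candidate_partitions (nodes : List Int) (partition_size : Int) : Prop :=
  1 ≤ partition_size ∨ (nodes = [] ∧ partition_size = 0)
instance (nodes : List Int) (partition_size : Int) : Decidable (Pre_all_candidate_partitions nodes partition_size) := by unfold Pre_all_candidate_partitions; infer_instance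

def pvWitness_all_candidate_partitions : List Int × Int := ([1, 2, 3, 4], 2)

def Spec_all_candidate_partitions (nodes : List Int) (partition_size : Int) (out : List (List (List Int))) : Prop := out = all_candidate_partitions_alt nodes partition_size
instance (nodes : List Int) (partition_size : Int) (out : List (List (List Int))) : Decidable (Spec_all_candidate_partitions nodes partition_size out) := by unfold Spec_all_candidate_partitions; infer_instance

-- ===== CLAIM (what is proved, stated in full; the proofs are below) =====
def Claim_equal_all_candidate_partitions : Prop := ∀ (nodes : List Int) (partition_size : Int), Dom_all_candidate_partitions nodes partition_size → Pre_all_candidate_partitions nodes partition_size → Spec_all_candidate_partitions nodes partition_size (all_candidate_partitions nodes partition_size)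

-- ===== LEMMAS AND PROOFS =====

theorem removeAll_nil (xs : List Int) : removeAll xs [] = xs := rfl

theorem removeAll_cons (xs : List Int) (v : Int) (c : List Int) (hv : v ∈ xs) :
    removeAll xs (v :: c) = removeAll (xs.erase v) c := by
  simp [removeAll, List.foldl_cons, PySem.List.remove?_eq_some_erase _ _ hv]

theorem sublist_erase {v : Int} {c : List Int} : ∀ {xs : List Int},
    (v :: c).Sublist xs → c.Sublist (xs.erase v)
  | [], h => by cases h
  | x :: xs, h => by
    by_cases hxv : x = v
    · subst hxv
      rw [List.erase_cons_head]
      cases h with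
      | cons _ h' => exact (List.sublist_cons_self _ c).trans h'
      | cons₂ _ h' => exact h'
    · rw [List.erase_cons_tail (by simp [hxv])]
      cases h with
      | cons _ h' => exact (sublist_erase h').cons x
      | cons₂ _ h' => exact absurd rfl hxv

theorem removeAll_length {c xs : List Int} (h : c.Sublist xs) :
    (removeAll xs c).length = xs.length - c.length := by
  induction c generalizing xs with
  | nil => simp [removeAll_nil]
  | cons v c ih =>
    have hv : v ∈ xs := h.subset (by simp)
    rw [removeAll_cons _ _ _ hv, ih (sublist_erase h)]
    rw [List.length_erase_of_mem hv]
    simp only [List.length_cons]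
    omega

-- A's step, rewritten from the nested foldl to flatMap/map form.
theorem acpFuel_succ (fuel : Nat) (nodes : List Int) (ps : Int) :
    acpFuel (fuel + 1) nodes ps =
      if (nodes.length : Int) = ps then [[nodes]]
      else (pyCombosInt nodes ps).flatMap
        (fun cur => (acpFuel fuel (removeAll nodes cur) ps).map (cur :: ·)) := by
  rw [acpFuel]
  split_ifs with h
  · rfl
  · rw [show (fun (acc : List (List (List Int))) (cur : List Int) =>
        (acpFuel fuel (removeAll nodes cur) ps).foldl (fun a rp => a ++ [cur :: rp]) acc)
      = fun acc cur => acc ++ (acpFuel fuel (removeAll nodes cur) ps).map (cur :: ·) from ?_]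
    · exact PySem.List.foldl_append_eq_flatMap _ _ _
    · funext acc cur
      exact PySem.List.foldl_append_singleton_eq_map _ _ _

theorem mem_pyCombosInt {nodes cur : List Int} {ps : Int} (hps : 1 ≤ ps)
    (h : cur ∈ pyCombosInt nodes ps) : cur.Sublist nodes ∧ cur.length = ps.toNat := by
  rw [pyCombosInt, if_neg (by omega)] at h
  exact (PySem.List.mem_combinations_iff _ _ _).mp h

theorem pyCombosInt_nil {ps : Int} (hps : 1 ≤ ps) : pyCombosInt [] ps = [] := by
  rw [pyCombosInt, if_neg (by omega)]
  have h : ps.toNat = (ps.toNat - 1) + 1 := by omega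
  rw [h, PySem.List.combinations_nil_succ]

-- A's result does not depend on the fuel, once the fuel exceeds the node count.
theorem acpFuel_fuel_irrel {ps : Int} (hps : 1 ≤ ps) :
    ∀ n (nodes : List Int), nodes.length ≤ n →
      ∀ f₁ f₂, nodes.length < f₁ → nodes.length < f₂ →
        acpFuel f₁ nodes ps = acpFuel f₂ nodes ps := by
  intro n
  induction n with
  | zero =>
    intro nodes hn f₁ f₂ h₁ h₂
    obtain ⟨f₁, rfl⟩ : ∃ g, f₁ = g + 1 := ⟨f₁ - 1, by omega⟩
    obtain ⟨f₂, rfl⟩ : ∃ g, f₂ = g + 1 := ⟨f₂ - 1, by omega⟩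
    rw [acpFuel_succ, acpFuel_succ]
    have hnil : nodes = [] := List.length_eq_zero_iff.mp (by omega)
    subst hnil
    rw [pyCombosInt_nil hps]
    simp
  | succ n ih =>
    intro nodes hn f₁ f₂ h₁ h₂
    obtain ⟨f₁, rfl⟩ : ∃ g, f₁ = g + 1 := ⟨f₁ - 1, by omega⟩
    obtain ⟨f₂, rfl⟩ : ∃ g, f₂ = g + 1 := ⟨f₂ - 1, by omega⟩
    rw [acpFuel_succ, acpFuel_succ]
    split_ifs with h
    · rfl
    · apply List.flatMap_congr
      intro cur hc
      obtain ⟨hsub, hlen⟩ := mem_pyCombosInt hps hc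
      have hrest : (removeAll nodes cur).length = nodes.length - ps.toNat := by
        rw [removeAll_length hsub, hlen]
      have hlt : (removeAll nodes cur).length < nodes.length := by
        rcases Nat.lt_or_ge nodes.length ps.toNat with hlt | hge
        · exact absurd (hsub.length_le.trans_lt (hlen ▸ hlt)) (by omega)
        · omega
      rw [ih (removeAll nodes cur) (by omega) f₁ f₂ (by omega) (by omega)]

-- Canonical A-value of a state.
theorem acpFuel_eq_A {ps : Int} (hps : 1 ≤ ps) (nodes : List Int) (f : Nat)
    (hf : nodes.length < f) :
    acpFuel f nodes ps = all_candidate_partitions nodes ps :=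
  acpFuel_fuel_irrel hps nodes.length nodes le_rfl f (nodes.length + 1) hf (by omega)

theorem combos_length_le (xs : List Int) (r : Nat) :
    (PySem.List.combinations xs r).length ≤ 2 ^ xs.length := by
  induction xs generalizing r with
  | nil =>
    cases r with
    | zero => simp [PySem.List.combinations_zero]
    | succ r => simp [PySem.List.combinations_nil_succ]
  | cons x xs ih =>
    cases r with
    | zero => simpa [PySem.List.combinations_zero] using Nat.one_le_two_pow
    | succ r =>
      rw [PySem.List.combinations_cons_succ]
      have h1 := ih r
      have h2 := ih (r + 1)
      simp only [List.length_append, List.length_map, List.length_cons]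
      calc (PySem.List.combinations xs r).length + (PySem.List.combinations xs (r+1)).length
          ≤ 2 ^ xs.length + 2 ^ xs.length := by omega
        _ = 2 ^ (xs.length + 1) := by ring

theorem sum_map_const {α : Type} (l : List α) (k : Nat) :
    (l.map (fun _ => k)).sum = l.length * k := by
  induction l with
  | nil => simp
  | cons x t ih => simp [Nat.succ_mul]; ring

theorem bFuel_pos (m : Nat) : 1 ≤ bFuel m := Nat.one_le_two_pow

theorem bFuel_mono {a b : Nat} (h : a ≤ b) : bFuel a ≤ bFuel b :=
  Nat.pow_le_pow_right (by norm_num) (by nlinarith)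

-- Measure of a worklist: enough fuel to exhaust it.
def stackCost (stack : List (List Int × List (List Int))) : Nat :=
  (stack.map (fun s => bFuel s.1.length)).sum

theorem stackCost_children_le {nodes : List Int} {ps : Int} (hps : 1 ≤ ps)
    (pre : List (List Int)) (hne : ¬ ((nodes.length : Int) = ps)) :
    stackCost ((pyCombosInt nodes ps).map
      (fun c => (removeAll nodes c, pre ++ [c]))) + 1 ≤ bFuel nodes.length := by
  rcases Nat.eq_zero_or_pos nodes.length with h0 | hpos
  · have hnil : nodes = [] := List.length_eq_zero_iff.mp h0
    subst hnil
    rw [pyCombosInt_nil hps]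
    simpa [stackCost] using bFuel_pos 0
  · -- every child has length ≤ nodes.length - 1
    set m := nodes.length with hm
    have hbound : ∀ s ∈ (pyCombosInt nodes ps).map
        (fun c => (removeAll nodes c, pre ++ [c])), bFuel s.1.length ≤ bFuel (m - 1) := by
      intro s hs
      obtain ⟨c, hc, rfl⟩ := List.mem_map.mp hs
      obtain ⟨hsub, hlen⟩ := mem_pyCombosInt hps hc
      have : (removeAll nodes c).length ≤ m - 1 := by
        rw [removeAll_length hsub]
        have := hsub.length_le
        omega
      exact bFuel_mono this
    have hlensum : stackCost ((pyCombosInt nodes ps).map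
        (fun c => (removeAll nodes c, pre ++ [c])))
        ≤ (pyCombosInt nodes ps).length * bFuel (m - 1) := by
      unfold stackCost
      have h1 : ((((pyCombosInt nodes ps).map (fun c => (removeAll nodes c, pre ++ [c]))).map
            (fun s => bFuel s.1.length))).sum
          ≤ ((((pyCombosInt nodes ps).map (fun c => (removeAll nodes c, pre ++ [c]))).map
            (fun _ => bFuel (m - 1)))).sum := by
        apply List.sum_le_sum
        intro s hs
        exact hbound s (by simpa using hs)
      have h2 : ((((pyCombosInt nodes ps).map (fun c => (removeAll nodes c, pre ++ [c]))).map
            (fun _ => bFuel (m - 1)))).sum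
          = (pyCombosInt nodes ps).length * bFuel (m - 1) := by
        rw [sum_map_const, List.length_map]
      omega
    have hcnt : (pyCombosInt nodes ps).length ≤ 2 ^ m := by
      unfold pyCombosInt
      split_ifs with h
      · simp
      · exact combos_length_le nodes ps.toNat
    have hkey : 2 ^ m * bFuel (m - 1) + 1 ≤ bFuel m := by
      unfold bFuel
      have h1 : m + (m - 1 + 1) * (m - 1 + 1) + 1 ≤ (m + 1) * (m + 1) := by nlinarith [Nat.sub_add_cancel hpos]
      calc 2 ^ m * 2 ^ ((m - 1 + 1) * (m - 1 + 1)) + 1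
          = 2 ^ (m + (m - 1 + 1) * (m - 1 + 1)) + 1 := by rw [pow_add]
        _ ≤ 2 ^ (m + (m - 1 + 1) * (m - 1 + 1) + 1) := by
            have := Nat.one_le_two_pow (n := m + (m - 1 + 1) * (m - 1 + 1))
            rw [pow_succ]; omega
        _ ≤ 2 ^ ((m + 1) * (m + 1)) := Nat.pow_le_pow_right (by norm_num) (by omega)
    calc stackCost _ + 1 ≤ (pyCombosInt nodes ps).length * bFuel (m - 1) + 1 := by omega
      _ ≤ 2 ^ m * bFuel (m - 1) + 1 := by
          have := Nat.mul_le_mul_right (bFuel (m - 1)) hcnt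
          omega
      _ ≤ bFuel m := hkey

-- Main worklist invariant: with enough fuel, bLoop appends, for each stacked state,
-- A's partitions of its remaining nodes, each prefixed by the state's prefix.
theorem bLoop_eq {ps : Int} (hps : 1 ≤ ps) :
    ∀ fuel (stack : List (List Int × List (List Int))) res,
      stackCost stack ≤ fuel →
      bLoop fuel ps stack res =
        res ++ stack.flatMap
          (fun s => (all_candidate_partitions s.1 ps).map (s.2 ++ ·)) := by
  intro fuel
  induction fuel with
  | zero =>
    intro stack res hc
    cases stack with
    | nil => simp [bLoop]
    | cons s t =>
      exfalso
      have := bFuel_pos s.1.length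
      simp [stackCost] at hc
      omega
  | succ fuel ih =>
    intro stack res hc
    cases stack with
    | nil => simp [bLoop]
    | cons s t =>
      obtain ⟨rem, pre⟩ := s
      have hcost : bFuel rem.length + stackCost t = stackCost (( rem, pre) :: t) := by
        simp [stackCost]
      rw [bLoop]
      split_ifs with hb
      · -- base case: emit
        have h1 := bFuel_pos rem.length
        rw [ih t (res ++ [pre ++ [rem]]) (by simp [stackCost] at hc ⊢; omega)]
        have hA : all_candidate_partitions rem ps = [[rem]] := by
          unfold all_candidate_partitions
          rw [acpFuel_succ, if_pos hb]
        simp [hA]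
      · -- expand
        have hch := stackCost_children_le hps pre hb
        have hcc : stackCost ((pyCombosInt rem ps).map
            (fun c => (removeAll rem c, pre ++ [c])) ++ t) ≤ fuel := by
          simp only [stackCost, List.map_append, List.sum_append, List.map_cons,
            List.sum_cons] at hc hch ⊢
          omega
        rw [ih _ res hcc]
        congr 1
        rw [List.flatMap_cons, List.flatMap_append]
        congr 1
        -- children flatMap = A's value at (rem, pre)
        have hA : all_candidate_partitions rem ps =
            (pyCombosInt rem ps).flatMap
              (fun cur => (all_candidate_partitions (removeAll rem cur) ps).map (cur :: ·)) := by
          unfold all_candidate_partitions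
          rw [acpFuel_succ, if_neg hb]
          apply List.flatMap_congr
          intro cur hcur
          obtain ⟨hsub, hlen⟩ := mem_pyCombosInt hps hcur
          have hlt : (removeAll rem cur).length < rem.length := by
            rw [removeAll_length hsub]
            have hle := hsub.length_le
            have : (0:Int) ≤ rem.length := by positivity
            have hne : rem.length ≠ ps.toNat := by
              intro h; apply hb; omega
            omega
          rw [acpFuel_eq_A hps _ _ (by omega)]
          rfl
        rw [hA, List.map_flatMap, List.flatMap_map]
        apply List.flatMap_congr
        intro cur _
        rw [List.map_map]
        apply List.map_congr_left
        intro x _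
        simp

-- ===== VERDICT (by name: the statement is the Claim_ definition above) =====
theorem all_candidate_partitions_spec : Claim_equal_all_candidate_partitions := by
  intro nodes ps _ hpre
  unfold Spec_all_candidate_partitions
  rcases hpre with hps | ⟨hnil, hz⟩
  · unfold all_candidate_partitions_alt
    rw [bLoop_eq hps (bFuel nodes.length) [(nodes, [])] [] (by simp [stackCost])]
    simp
  · subst hnil; subst hz
    decide
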